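-- pv_equiv track=rewrite | github.com/AstraZeneca/roo | src/roo/files/rprofile.py | _find_rprofile_marker_zone
-- ===== SOURCE A (Python) =====
-- from typing import Union, Optional
--
-- def _find_rprofile_marker_zone(content: list) -> Union[tuple, None]:
--     """
--     Find the start and stop index of the last occurrence of the
--     roo added section, and return them as a tuple. If it cannot find
--     any section, returns None
--     """
--     start_pos = None
--     end_pos = None
--
--     for idx, line in enumerate(content):
--         if line.startswith("# >>> created by roo"):
--             if start_pos is not None:
--                 end_pos = None
--             start_pos = idx
--         elif line.startswith("# <<< created by roo"):
--             if start_pos is None: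
--                 continue
--             end_pos = idx
--
--     if start_pos is None or end_pos is None:
--         return None
--
--     return start_pos, end_pos
-- ===== SOURCE B (Python) =====
-- def _find_rprofile_marker_zone(content: list):
--     """Two early-terminating reverse scans instead of one forward
--     accumulating pass: find the last start marker, then the last end
--     marker strictly after it."""
--     start_pos = None
--     for idx, line in reversed(list(enumerate(content))):
--         if line.startswith("# >>> created by roo"):
--             start_pos = idx
--             break
--     if start_pos is None:
--         return None
--     for idx, line in reversed(list(enumerate(content))):
--         if idx <= start_pos:
--             break
--         if line.startswith("# <<< created by roo"):
--             return start_pos, idx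
--     return None
-- ===== Notes on version B (the rewrite author's own statement) =====
-- stated objective: alternative
-- what changed: Replaces the single forward pass that accumulates and resets start/end state with two early-terminating reverse scans: first for the last start marker, then for the last end marker strictly after it.
import Mathlib
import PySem

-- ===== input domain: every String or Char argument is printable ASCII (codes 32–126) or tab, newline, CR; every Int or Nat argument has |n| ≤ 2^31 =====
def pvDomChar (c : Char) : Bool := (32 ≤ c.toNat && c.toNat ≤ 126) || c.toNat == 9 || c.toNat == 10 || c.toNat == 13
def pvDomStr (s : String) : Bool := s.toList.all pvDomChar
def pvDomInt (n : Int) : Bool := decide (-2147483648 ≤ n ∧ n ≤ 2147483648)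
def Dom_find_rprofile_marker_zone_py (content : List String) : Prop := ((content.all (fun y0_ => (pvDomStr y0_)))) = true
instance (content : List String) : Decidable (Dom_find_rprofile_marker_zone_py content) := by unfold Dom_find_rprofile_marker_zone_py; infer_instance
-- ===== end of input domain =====

-- B replaces A's single forward accumulating pass with two early-terminating
-- reverse scans (last start marker, then last end marker strictly after it);
-- objective: alternative decomposition, same cost.


-- ===== PORT A =====
-- the loop body of A: state is (start_pos, end_pos)
def rooStepA (st : Option Int × Option Int) (p : Int × String) : Option Int × Option Int :=
  if PySem.Str.startswith p.2 "# >>> created by roo" then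
    (some p.1, if st.1.isSome then none else st.2)
  else if PySem.Str.startswith p.2 "# <<< created by roo" then
    (st.1, if st.1.isSome then some p.1 else st.2)
  else st

def find_rprofile_marker_zone_py (content : List String) : Option (Int × Int) :=
  match (PySem.List.enumerate content).foldl rooStepA (none, none) with
  | (some s, some e) => some (s, e)
  | _ => none

-- ===== PORT B =====
def rooIsStart (p : Int × String) : Bool := PySem.Str.startswith p.2 "# >>> created by roo"
def rooIsEnd (p : Int × String) : Bool := PySem.Str.startswith p.2 "# <<< created by roo"

-- the second scan's 'break on idx <= start_pos' is exact as a filter inside the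
-- predicate: indices strictly decrease along the reversed enumeration, so once
-- idx ≤ start_pos no later element can satisfy start_pos < idx.
def find_rprofile_marker_zone_py_alt (content : List String) : Option (Int × Int) :=
  match ((PySem.List.enumerate content).reverse).find? rooIsStart with
  | none => none
  | some sp =>
    match ((PySem.List.enumerate content).reverse).find? (fun p => decide (sp.1 < p.1) && rooIsEnd p) with
    | none => none
    | some ep => some (sp.1, ep.1)

-- ===== PRECONDITION & SPEC =====
def Spec_find_rprofile_marker_zone_py (content : List String) (out : Option (Int × Int)) : Prop := out = find_rprofile_marker_zone_py_alt content
instance (content : List String) (out : Option (Int × Int)) : Decidable (Spec_find_rprofile_marker_zone_py content out) := by unfold Spec_find_rprofile_marker_zone_py; infer_instance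

-- ===== CLAIM (what is proved, stated in full; the proofs are below) =====
def Claim_equal_find_rprofile_marker_zone_py : Prop := ∀ (content : List String), Dom_find_rprofile_marker_zone_py content → Spec_find_rprofile_marker_zone_py content (find_rprofile_marker_zone_py content)

-- ===== LEMMAS AND PROOFS =====

-- B's two scan results, as functions (proof-only helpers)
def rooS (xs : List String) : Option (Int × String) :=
  ((PySem.List.enumerate xs).reverse).find? rooIsStart

def rooE (xs : List String) : Option Int :=
  (rooS xs).bind (fun sp =>
    (((PySem.List.enumerate xs).reverse).find? (fun p => decide (sp.1 < p.1) && rooIsEnd p)).map Prod.fst)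

lemma roo_mem_lt (xs : List String) (p : Int × String)
    (h : p ∈ (PySem.List.enumerate xs).reverse) : p.1 < (xs.length : Int) := by
  rw [List.mem_reverse] at h
  rcases (PySem.List.mem_enumerate_iff xs 0 p).1 h with ⟨k, hk, rfl⟩
  simp; omega

lemma roo_fold_char (xs : List String) :
    (PySem.List.enumerate xs).foldl rooStepA (none, none) =
      ((rooS xs).map Prod.fst, rooE xs) := by
  induction xs using List.reverseRecOn with
  | nil => simp [rooS, rooE, PySem.List.enumerate]
  | append_singleton xs x ih =>
    have henum : PySem.List.enumerate (xs ++ [x]) =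
        PySem.List.enumerate xs ++ [((xs.length : Int), x)] := by
      rw [PySem.List.enumerate_append]; simp [PySem.List.enumerate_cons, PySem.List.enumerate_nil]
    have hrev : (PySem.List.enumerate (xs ++ [x])).reverse =
        ((xs.length : Int), x) :: (PySem.List.enumerate xs).reverse := by
      rw [henum]; simp
    rw [henum, List.foldl_append, ih, List.foldl_cons, List.foldl_nil]
    by_cases hs : rooIsStart ((xs.length : Int), x)
    · -- the new last line is a start marker: start := n, end resets to none
      have hS' : rooS (xs ++ [x]) = some ((xs.length : Int), x) := by
        rw [rooS, hrev, List.find?_cons_of_pos hs]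
      have hfind : (((PySem.List.enumerate (xs ++ [x])).reverse).find?
          (fun p => decide (((xs.length : Int), x).1 < p.1) && rooIsEnd p)) = none := by
        rw [List.find?_eq_none]
        intro p hp
        rw [hrev] at hp
        rcases List.mem_cons.1 hp with rfl | hp
        · simp
        · have := roo_mem_lt xs p hp
          simp only [Bool.and_eq_true, decide_eq_true_eq, not_and]
          intro h; omega
      have hE' : rooE (xs ++ [x]) = none := by
        rw [rooE, hS', Option.bind_some, hfind]; rfl
      rw [hS', hE']
      simp only [rooIsStart] at hs
      cases hSx : rooS xs with
      | none =>
        have hEx : rooE xs = none := by rw [rooE, hSx]; rfl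
        simp only [rooStepA]
        rw [if_pos hs]
        simp [hEx]
      | some sp =>
        simp only [rooStepA]
        rw [if_pos hs]
        simp
    · -- not a start marker
      have hS' : rooS (xs ++ [x]) = rooS xs := by
        rw [rooS, hrev, List.find?_cons_of_neg hs, rooS]
      by_cases he : rooIsEnd ((xs.length : Int), x)
      · -- an end marker
        cases hSx : rooS xs with
        | none =>
          have hE' : rooE (xs ++ [x]) = none := by rw [rooE, hS', hSx]; rfl
          have hEx : rooE xs = none := by rw [rooE, hSx]; rfl
          rw [hS', hE']
          simp only [rooIsStart] at hs
          simp only [rooIsEnd] at he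
          rw [hSx]
          simp only [rooStepA]
          rw [if_neg hs, if_pos he]
          simp [hEx]
        | some sp =>
          have hsp : sp.1 < (xs.length : Int) := by
            apply roo_mem_lt xs
            exact List.mem_of_find?_eq_some hSx
          have hE' : rooE (xs ++ [x]) = some (xs.length : Int) := by
            rw [rooE, hS', hSx, Option.bind_some, hrev, List.find?_cons_of_pos]
            · rfl
            · simp only [Bool.and_eq_true, decide_eq_true_eq]
              exact ⟨hsp, he⟩
          rw [hS', hE']
          simp only [rooIsStart] at hs
          simp only [rooIsEnd] at he
          rw [hSx]
          simp only [rooStepA]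
          rw [if_neg hs, if_pos he]
          simp
      · -- neither marker: state unchanged
        have hE' : rooE (xs ++ [x]) = rooE xs := by
          rw [rooE, rooE, hS']
          cases hSx : rooS xs with
          | none => rfl
          | some sp =>
            rw [Option.bind_some, Option.bind_some, hrev, List.find?_cons_of_neg]
            simp only [Bool.and_eq_true, not_and]
            intro _; exact fun h => he h
        rw [hS', hE']
        simp only [rooIsStart] at hs
        simp only [rooIsEnd] at he
        simp only [rooStepA]
        rw [if_neg hs, if_neg he]

-- ===== VERDICT (by name: the statement is the Claim_ definition above) =====
theorem find_rprofile_marker_zone_py_spec : Claim_equal_find_rprofile_marker_zone_py := by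
  intro content _
  unfold Spec_find_rprofile_marker_zone_py
  unfold find_rprofile_marker_zone_py find_rprofile_marker_zone_py_alt
  rw [roo_fold_char, ← rooS.eq_def]
  cases hSx : rooS content with
  | none =>
    have hEx : rooE content = none := by rw [rooE, hSx]; rfl
    rw [hEx]
    rfl
  | some sp =>
    have hEx : rooE content = (((PySem.List.enumerate content).reverse).find?
        (fun p => decide (sp.1 < p.1) && rooIsEnd p)).map Prod.fst := by
      rw [rooE, hSx, Option.bind_some]
    rw [hEx]
    cases hE : ((PySem.List.enumerate content).reverse).find?
        (fun p => decide (sp.1 < p.1) && rooIsEnd p) with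
    | none => simp [hE]
    | some ep => simp [hE]
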